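-- pv_equiv track=rewrite | github.com/Siguoqing/NurbsVQVAE_code | 2sequence_nurbs_v2.py | dfs_face_ordering_from_core
-- ===== SOURCE A (Python) =====
-- def dfs_face_ordering_from_core(edge_face_pairs, num_faces: int):
--     nbrs = [set() for _ in range(num_faces)]
--     for f1, f2 in edge_face_pairs:
--         if 0 <= f1 < num_faces and 0 <= f2 < num_faces and f1 != f2:
--             nbrs[f1].add(f2)
--             nbrs[f2].add(f1)
--     deg = [len(n) for n in nbrs]
--     visited = [False] * num_faces
--     face_order: list[int] = []
--     seeds = sorted(range(num_faces), key=lambda x: (-deg[x], x))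
--
--     def dfs(u: int):
--         visited[u] = True
--         face_order.append(u)
--         neighbors = [v for v in nbrs[u] if not visited[v]]
--         neighbors.sort(key=lambda x: (deg[x], x))
--         for v in neighbors:
--             if not visited[v]:
--                 dfs(v)
--
--     for seed in seeds:
--         if not visited[seed]:
--             dfs(seed)
--
--     return face_order, {face_id: pos for pos, face_id in enumerate(face_order)}
-- ===== SOURCE B (Python) =====
-- def dfs_face_ordering_from_core(edge_face_pairs, num_faces: int):
--     nbrs = [set() for _ in range(num_faces)]
--     for f1, f2 in edge_face_pairs:
--         if 0 <= f1 < num_faces and 0 <= f2 < num_faces and f1 != f2: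
--             nbrs[f1].add(f2)
--             nbrs[f2].add(f1)
--     deg = [len(n) for n in nbrs]
--     visited = [False] * num_faces
--     face_order = []
--     seeds = sorted(range(num_faces), key=lambda x: (-deg[x], x))
--     for seed in seeds:
--         if visited[seed]:
--             continue
--         stack = [seed]
--         while stack:
--             u = stack.pop()
--             if visited[u]:
--                 continue
--             visited[u] = True
--             face_order.append(u)
--             ns = sorted((v for v in nbrs[u] if not visited[v]), key=lambda x: (deg[x], x))
--             stack.extend(reversed(ns))
--     return face_order, {face_id: pos for pos, face_id in enumerate(face_order)}
-- ===== Notes on version B (the rewrite author's own statement) =====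
-- stated objective: alternative
-- what changed: The recursive dfs (call per node, for-loop over sorted neighbors with a visited re-check) is replaced by an explicit-stack iterative loop: pop, skip if visited, else mark/append and push the sorted unvisited neighbors in reverse so they pop in ascending (deg,id) order; the adjacency/degree/seed setup and the final position dict are unchanged.
import Mathlib
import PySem

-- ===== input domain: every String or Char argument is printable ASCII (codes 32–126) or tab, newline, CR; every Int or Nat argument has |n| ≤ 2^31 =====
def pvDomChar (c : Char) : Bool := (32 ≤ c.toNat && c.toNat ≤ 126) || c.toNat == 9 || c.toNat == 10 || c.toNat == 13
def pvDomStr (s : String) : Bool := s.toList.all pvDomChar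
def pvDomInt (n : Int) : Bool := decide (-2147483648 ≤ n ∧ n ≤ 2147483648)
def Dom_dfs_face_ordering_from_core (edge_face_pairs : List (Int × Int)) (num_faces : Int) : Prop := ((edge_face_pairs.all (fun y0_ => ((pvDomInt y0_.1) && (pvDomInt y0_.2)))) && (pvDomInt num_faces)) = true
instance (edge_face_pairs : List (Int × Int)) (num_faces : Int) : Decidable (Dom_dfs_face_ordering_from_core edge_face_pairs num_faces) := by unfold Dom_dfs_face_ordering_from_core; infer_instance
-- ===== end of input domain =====

-- B replaces A's recursive dfs by an explicit stack loop (same adjacency/deg/seed setup,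
-- neighbors pushed in reverse sorted order, visited re-checked on pop): an alternative
-- decomposition of the same preorder traversal, not claimed faster.

-- ===== SHARED SETUP (identical lines in both Pythons: adjacency sets, degrees, seeds) =====

-- nbrs = [set() for _ in range(num_faces)]; guarded symmetric insertion
def pvBuildNbrs (edge_face_pairs : List (Int × Int)) (num_faces : Int) : List (PySem.Set Int) :=
  edge_face_pairs.foldl (fun nb p =>
    if 0 ≤ p.1 ∧ p.1 < num_faces ∧ 0 ≤ p.2 ∧ p.2 < num_faces ∧ p.1 ≠ p.2 then
      let nb1 := PySem.List.pySetD nb p.1 (PySem.Set.add (PySem.List.pyGetD nb p.1 []) p.2)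
      PySem.List.pySetD nb1 p.2 (PySem.Set.add (PySem.List.pyGetD nb1 p.2 []) p.1)
    else nb)
    (List.replicate num_faces.toNat ([] : PySem.Set Int))

-- visited[u]; every index that reaches this lookup lies in [0, num_faces), so the
-- out-of-range default `true` (treated as visited) is never observed.
def pvVisited (vis : List Bool) (u : Int) : Bool :=
  if 0 ≤ u then vis.getD u.toNat true else true

-- [v for v in nbrs[u] if not visited[v]] sorted by (deg[x], x); the sort key is
-- injective (it contains x), so the Python set-iteration order is irrelevant.
def pvUnvNbrs (nbrs : List (PySem.Set Int)) (deg : List Int) (vis : List Bool) (u : Int) : List Int :=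
  PySem.List.sorted2 ((PySem.List.pyGetD nbrs u []).filter (fun v => !(pvVisited vis v)))
    (fun x => PySem.List.pyGetD deg x 0) (fun x => x)

-- seeds = sorted(range(num_faces), key=lambda x: (-deg[x], x))
def pvSeeds (deg : List Int) (num_faces : Int) : List Int :=
  PySem.List.sorted2 (PySem.List.pyRange 0 num_faces 1)
    (fun x => -(PySem.List.pyGetD deg x 0)) (fun x => x)

-- {face_id: pos for pos, face_id in enumerate(face_order)} (keys are distinct)
def pvPosDict (order : List Int) : List (Int × Int) :=
  (PySem.List.enumerate order).map (fun p => (p.2, p.1))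

-- termination helper for B's stack loop (cited by name in decreasing_by): marking an
-- unvisited face strictly decreases the number of `false` entries
theorem pvCountSetTrueLt (l : List Bool) (i : Nat) (h : l.getD i true = false) :
    (l.set i true).count false < l.count false := by
  induction l generalizing i with
  | nil => simp [List.getD] at h
  | cons b t ih =>
    cases i with
    | zero => simp_all
    | succ j =>
      simp only [List.set, List.count_cons]
      have := ih j (by simpa [List.getD] using h)
      omega

theorem pvVisitedFalseLt (vis : List Bool) (u : Int) (h : pvVisited vis u = false) :
    (vis.set u.toNat true).count false < vis.count false := by
  unfold pvVisited at h
  split at h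
  · exact pvCountSetTrueLt vis u.toNat h
  · simp at h

-- ===== PORT A =====
-- recursive dfs(u): mark u, append u, then recurse over the sorted unvisited neighbors,
-- re-checking visited before each call.  fuel = num_faces.toNat bounds the recursion
-- depth (each call visits a new face); it is never exhausted (proved below).
def pvDfsA (nbrs : List (PySem.Set Int)) (deg : List Int) :
    Nat → Int → List Bool × List Int → List Bool × List Int
  | 0, _, s => s
  | n+1, u, s =>
    let s1 := (s.1.set u.toNat true, s.2 ++ [u])
    let ns := pvUnvNbrs nbrs deg s1.1 u
    ns.foldl (fun t v => if pvVisited t.1 v then t else pvDfsA nbrs deg n v t) s1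

def dfs_face_ordering_from_core (edge_face_pairs : List (Int × Int)) (num_faces : Int) : List Int × (List (Int × Int)) :=
  let nbrs := pvBuildNbrs edge_face_pairs num_faces
  let deg := nbrs.map (fun s => (PySem.Set.len s : Int))
  let s := (pvSeeds deg num_faces).foldl
    (fun s seed => if pvVisited s.1 seed then s else pvDfsA nbrs deg num_faces.toNat seed s)
    (List.replicate num_faces.toNat false, [])
  (s.2, pvPosDict s.2)

-- ===== PORT B =====
-- explicit stack (head = top): pop u, skip if visited, else mark, append, and push the
-- sorted unvisited neighbors so they pop in ascending order (stack.extend(reversed(ns))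
-- with top-at-head is ns ++ rest).
def pvLoopB (nbrs : List (PySem.Set Int)) (deg : List Int) :
    List Int → List Bool × List Int → List Bool × List Int
  | [], s => s
  | u :: rest, s =>
    if hvv : pvVisited s.1 u then pvLoopB nbrs deg rest s
    else
      let s1 := (s.1.set u.toNat true, s.2 ++ [u])
      let ns := pvUnvNbrs nbrs deg s1.1 u
      pvLoopB nbrs deg (ns ++ rest) s1
  termination_by st s => (s.1.count false, st.length)
  decreasing_by
  · exact Prod.Lex.right _ (Nat.lt_succ_self _)
  · exact Prod.Lex.left _ _ (pvVisitedFalseLt s.1 u (by simpa using hvv))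

def dfs_face_ordering_from_core_alt (edge_face_pairs : List (Int × Int)) (num_faces : Int) : List Int × (List (Int × Int)) :=
  let nbrs := pvBuildNbrs edge_face_pairs num_faces
  let deg := nbrs.map (fun s => (PySem.Set.len s : Int))
  let s := (pvSeeds deg num_faces).foldl
    (fun s seed => if pvVisited s.1 seed then s else pvLoopB nbrs deg [seed] s)
    (List.replicate num_faces.toNat false, [])
  (s.2, pvPosDict s.2)

-- ===== PRECONDITION & SPEC =====
def Spec_dfs_face_ordering_from_core (edge_face_pairs : List (Int × Int)) (num_faces : Int) (out : List Int × (List (Int × Int))) : Prop := out = dfs_face_ordering_from_core_alt edge_face_pairs num_faces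
instance (edge_face_pairs : List (Int × Int)) (num_faces : Int) (out : List Int × (List (Int × Int))) : Decidable (Spec_dfs_face_ordering_from_core edge_face_pairs num_faces out) := by unfold Spec_dfs_face_ordering_from_core; infer_instance

-- ===== CLAIM (what is proved, stated in full; the proofs are below) =====
def Claim_equal_dfs_face_ordering_from_core : Prop := ∀ (edge_face_pairs : List (Int × Int)) (num_faces : Int), Dom_dfs_face_ordering_from_core edge_face_pairs num_faces → Spec_dfs_face_ordering_from_core edge_face_pairs num_faces (dfs_face_ordering_from_core edge_face_pairs num_faces)

-- ===== LEMMAS AND PROOFS =====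

-- a foldl preserves any invariant its step preserves
theorem pvFoldlInv {α σ : Type} (f : σ → α → σ) (P : σ → Prop)
    (h : ∀ s a, P s → P (f s a)) : ∀ (L : List α) (s : σ), P s → P (L.foldl f s) := by
  intro L
  induction L with
  | nil => intro s hs; exact hs
  | cons a L ih => intro s hs; exact ih _ (h s a hs)

theorem pvCountSetTrueLe (l : List Bool) (i : Nat) :
    (l.set i true).count false ≤ l.count false := by
  induction l generalizing i with
  | nil => simp
  | cons b t ih =>
    cases i with
    | zero => simp [List.count_cons]
    | succ j => simp only [List.set, List.count_cons]; have := ih j; omega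

theorem pvLenDfsA (nbrs : List (PySem.Set Int)) (deg : List Int) :
    ∀ (n : Nat) (u : Int) (s : List Bool × List Int),
      (pvDfsA nbrs deg n u s).1.length = s.1.length := by
  intro n
  induction n with
  | zero => intro u s; rfl
  | succ n ih =>
    intro u s
    simp only [pvDfsA]
    have := pvFoldlInv
      (fun t v => if pvVisited t.1 v then t else pvDfsA nbrs deg n v t)
      (fun t => t.1.length = s.1.length)
      (by
        intro t v ht
        by_cases hv : pvVisited t.1 v
        · simpa [hv]
        · simpa [hv] using (ih v t).trans ht)
      (pvUnvNbrs nbrs deg (s.1.set u.toNat true) u)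
      (s.1.set u.toNat true, s.2 ++ [u])
      (by simp)
    simpa using this

theorem pvCntDfsA (nbrs : List (PySem.Set Int)) (deg : List Int) :
    ∀ (n : Nat) (u : Int) (s : List Bool × List Int),
      (pvDfsA nbrs deg n u s).1.count false ≤ s.1.count false := by
  intro n
  induction n with
  | zero => intro u s; exact le_rfl
  | succ n ih =>
    intro u s
    simp only [pvDfsA]
    have := pvFoldlInv
      (fun t v => if pvVisited t.1 v then t else pvDfsA nbrs deg n v t)
      (fun t => t.1.count false ≤ s.1.count false)
      (by
        intro t v ht
        by_cases hv : pvVisited t.1 v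
        · simpa [hv]
        · simpa [hv] using (ih v t).trans ht)
      (pvUnvNbrs nbrs deg (s.1.set u.toNat true) u)
      (s.1.set u.toNat true, s.2 ++ [u])
      (by simpa using pvCountSetTrueLe s.1 u.toNat)
    simpa using this

theorem pvVisitedFalseCntPos (vis : List Bool) (u : Int) (h : pvVisited vis u = false) :
    1 ≤ vis.count false := by
  have := pvVisitedFalseLt vis u h
  omega

-- the key bridge: one stack entry is processed exactly as one (guarded) recursive call
theorem pvBridge (nbrs : List (PySem.Set Int)) (deg : List Int) :
    ∀ (n : Nat) (u : Int) (rest : List Int) (s : List Bool × List Int),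
      s.1.count false ≤ n →
      pvLoopB nbrs deg (u :: rest) s
        = pvLoopB nbrs deg rest (if pvVisited s.1 u then s else pvDfsA nbrs deg n u s) := by
  intro n
  induction n with
  | zero =>
    intro u rest s hcnt
    by_cases hv : pvVisited s.1 u
    · rw [pvLoopB]; simp [hv]
    · exact absurd hcnt (by have := pvVisitedFalseCntPos s.1 u (by simpa using hv); omega)
  | succ n ih =>
    intro u rest s hcnt
    by_cases hv : pvVisited s.1 u
    · rw [pvLoopB]; simp [hv]
    · have hveq : pvVisited s.1 u = false := by simpa using hv
      have hcnt1 : (s.1.set u.toNat true).count false ≤ n := by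
        have := pvVisitedFalseLt s.1 u hveq
        omega
      have aux : ∀ (L : List Int) (rest' : List Int) (t : List Bool × List Int),
          t.1.count false ≤ n →
          pvLoopB nbrs deg (L ++ rest') t
            = pvLoopB nbrs deg rest'
                (L.foldl (fun t v => if pvVisited t.1 v then t else pvDfsA nbrs deg n v t) t) := by
        intro L
        induction L with
        | nil => intro rest' t _; simp
        | cons v L' ihL =>
          intro rest' t ht
          have step := ih v (L' ++ rest') t ht
          simp only [List.cons_append, List.foldl_cons]
          rw [step]
          by_cases hvv : pvVisited t.1 v
          · simpa [hvv] using ihL rest' t ht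
          · simp only [hvv]
            exact ihL rest' (pvDfsA nbrs deg n v t)
              ((pvCntDfsA nbrs deg n v t).trans ht)
      rw [pvLoopB]
      simp only [hveq, Bool.false_eq_true, if_false, dite_false]
      rw [aux _ rest _ hcnt1]
      simp [pvDfsA]

-- the seed loops coincide (the visited array keeps its length, so the fuel suffices)
theorem pvSeedFold (nbrs : List (PySem.Set Int)) (deg : List Int) (K : Nat) :
    ∀ (L : List Int) (s : List Bool × List Int), s.1.length = K →
      L.foldl (fun s seed => if pvVisited s.1 seed then s else pvDfsA nbrs deg K seed s) s
        = L.foldl (fun s seed => if pvVisited s.1 seed then s else pvLoopB nbrs deg [seed] s) s := by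
  intro L
  induction L with
  | nil => intro s _; rfl
  | cons seed L ih =>
    intro s hs
    by_cases hv : pvVisited s.1 seed
    · simp only [List.foldl_cons, hv, if_true]
      exact ih s hs
    · have hcnt : s.1.count false ≤ K := hs ▸ List.count_le_length
      have h1 : pvLoopB nbrs deg [seed] s = pvDfsA nbrs deg K seed s := by
        have := pvBridge nbrs deg K seed [] s hcnt
        rw [this]
        simp [hv]
        rw [pvLoopB]
      simp only [List.foldl_cons, hv, h1]
      exact ih _ ((pvLenDfsA nbrs deg K seed s).trans hs)

-- ===== VERDICT (by name: the statement is the Claim_ definition above) =====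
theorem dfs_face_ordering_from_core_spec : Claim_equal_dfs_face_ordering_from_core := by
  intro edge_face_pairs num_faces _
  unfold Spec_dfs_face_ordering_from_core
  unfold dfs_face_ordering_from_core dfs_face_ordering_from_core_alt
  dsimp only
  rw [pvSeedFold _ _ _ _ _ (by simp)]
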